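-- pv_equiv track=rewrite | github.com/geomaster/naive-bayes-tweets | nlp.py | create_wordvec
-- ===== SOURCE A (Python) =====
-- def create_wordvec(words, tweet):
--     freq = {}
--     for word in tweet:
--         try:
--             j = words.index(word)
--             if j not in freq:
--                 freq[j] = 1
--             else:
--                 freq[j] += 1
--         except ValueError:
--             continue
--
--     return {i: f for i, f in freq.items()}
-- ===== SOURCE B (Python) =====
-- def create_wordvec(words, tweet):
--     # Staged: dedupe the tweet (first-occurrence order), then for each distinct
--     # word look it up in the vocabulary and take its whole count at once.
--     out = {}
--     for w in dict.fromkeys(tweet):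
--         if w in words:
--             out[words.index(w)] = tweet.count(w)
--     return out
-- ===== Notes on version B (the rewrite author's own statement) =====
-- stated objective: alternative
-- what changed: A makes one pass over the tweet incrementing a dict counter keyed by words.index(word); B has no incremental counter: it dedupes the tweet into its distinct words in first-occurrence order and, for each distinct word found in the vocabulary, sets freq[words.index(w)] = tweet.count(w) in one shot.
import Mathlib
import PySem

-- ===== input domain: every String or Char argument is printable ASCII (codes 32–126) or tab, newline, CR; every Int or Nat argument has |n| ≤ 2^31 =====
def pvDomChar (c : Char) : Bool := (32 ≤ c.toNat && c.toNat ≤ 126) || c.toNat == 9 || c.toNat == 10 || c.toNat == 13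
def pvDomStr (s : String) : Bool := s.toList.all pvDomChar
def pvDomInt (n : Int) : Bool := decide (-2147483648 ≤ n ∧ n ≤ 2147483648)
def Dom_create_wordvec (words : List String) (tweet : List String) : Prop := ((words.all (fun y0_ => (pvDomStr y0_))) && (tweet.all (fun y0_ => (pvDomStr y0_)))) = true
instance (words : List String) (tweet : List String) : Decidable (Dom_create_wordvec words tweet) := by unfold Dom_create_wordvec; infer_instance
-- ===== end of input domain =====

-- B replaces A's incremental per-tweet-word counter by a staged pass: dedupe the
-- tweet, then for each distinct vocabulary word set its whole tweet.count at once
-- (objective: alternative decomposition, similar cost).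

-- ===== PORT A =====
-- A: for each tweet word, try words.index(word); increment a count per index in a dict.
def create_wordvec (words : List String) (tweet : List String) : List (Int × Int) :=
  let freq : PySem.Dict Int Int :=
    tweet.foldl (fun freq word =>
      match PySem.List.index? words word with   -- j = words.index(word); ValueError → skip
      | some j =>
          if freq.contains (j : Int) = false then freq.insert (j : Int) 1
          else freq.modify (j : Int) 0 (· + 1)  -- freq[j] += 1 (key present on this branch)
      | none => freq) PySem.Dict.empty
  freq.items   -- {i: f for i, f in freq.items()} is an identity copy

-- ===== PORT B =====
-- B: for w in dict.fromkeys(tweet): if w in words: out[words.index(w)] = tweet.count(w)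
def create_wordvec_alt (words : List String) (tweet : List String) : List (Int × Int) :=
  let out : PySem.Dict Int Int :=
    (PySem.List.dedup tweet).foldl (fun out w =>
      if words.contains w then
        match PySem.List.index? words w with    -- words.index(w); the guard makes it defined
        | some j => out.insert (j : Int) (PySem.List.count tweet w)
        | none => out
      else out) PySem.Dict.empty
  out.items

-- ===== PRECONDITION & SPEC =====
def Spec_create_wordvec (words : List String) (tweet : List String) (out : List (Int × Int)) : Prop := out = create_wordvec_alt words tweet
instance (words : List String) (tweet : List String) (out : List (Int × Int)) : Decidable (Spec_create_wordvec words tweet out) := by unfold Spec_create_wordvec; infer_instance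

-- ===== CLAIM (what is proved, stated in full; the proofs are below) =====
def Claim_equal_create_wordvec : Prop := ∀ (words : List String) (tweet : List String), Dom_create_wordvec words tweet → Spec_create_wordvec words tweet (create_wordvec words tweet)

-- ===== LEMMAS AND PROOFS =====

-- `words.index` as an Option Int (the key function both programs share)
def pvFirstIdx (words : List String) (w : String) : Option Int :=
  (PySem.List.index? words w).map (fun (n : Nat) => (n : Int))

-- first indices identify the word: two words with the same first index are equal
theorem pvFirstIdx_inj {words : List String} {a b : String} {c : Int}
    (ha : pvFirstIdx words a = some c) (hb : pvFirstIdx words b = some c) : a = b := by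
  unfold pvFirstIdx at ha hb
  rcases hka : PySem.List.index? words a with _ | ka <;> (rw [hka] at ha; simp at ha)
  rcases hkb : PySem.List.index? words b with _ | kb <;> (rw [hkb] at hb; simp at hb)
  have hkab : ka = kb := by omega
  subst hkab
  obtain ⟨h1, h2, -⟩ := PySem.List.getElem_of_index?_eq_some hka
  obtain ⟨h1', h2', -⟩ := PySem.List.getElem_of_index?_eq_some hkb
  rw [← h2, ← h2']

-- the set of first-occurrence indices is the filterMap-image of the set of tweet words
theorem pvOfList_filterMap {α β : Type} [BEq α] [LawfulBEq α] [BEq β] [LawfulBEq β]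
    (f : α → Option β) (hinj : ∀ a b c, f a = some c → f b = some c → a = b) :
    ∀ (l : List α) (s : List α),
    (l.filterMap f).foldl PySem.Set.add (s.filterMap f) = (l.foldl PySem.Set.add s).filterMap f := by
  intro l
  induction l with
  | nil => intro s; rfl
  | cons x xs ih =>
    intro s
    rcases hfx : f x with _ | c
    · have h1 : (x :: xs).filterMap f = xs.filterMap f := by simp [hfx]
      have h2 : (PySem.Set.add s x).filterMap f = s.filterMap f := by
        unfold PySem.Set.add
        split
        · rfl
        · simp [hfx]
      rw [h1, List.foldl_cons, ← h2, ih]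
    · have h1 : (x :: xs).filterMap f = c :: xs.filterMap f := by simp [hfx]
      have h2 : PySem.Set.add (s.filterMap f) c = (PySem.Set.add s x).filterMap f := by
        unfold PySem.Set.add
        by_cases hm : x ∈ s
        · have hcm : c ∈ s.filterMap f := List.mem_filterMap.mpr ⟨x, hm, hfx⟩
          rw [if_pos (by simpa using hcm), if_pos (by simpa using hm)]
        · have hcm : c ∉ s.filterMap f := by
            intro hc
            obtain ⟨a, ham, hfa⟩ := List.mem_filterMap.mp hc
            exact hm (hinj a x c hfa hfx ▸ ham)
          rw [if_neg (by simpa using hcm), if_neg (by simpa using hm)]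
          simp [hfx]
      rw [h1, List.foldl_cons, List.foldl_cons, ← ih, h2]

-- A's loop over the tweet is the Counter loop over the tweet's first-occurrence indices
theorem pvA_loop (words : List String) :
    ∀ (tweet : List String) (d : PySem.Dict Int Int),
    tweet.foldl (fun freq word =>
        match PySem.List.index? words word with
        | some j => if freq.contains (j : Int) = false then freq.insert (j : Int) 1
                    else freq.modify (j : Int) 0 (· + 1)
        | none => freq) d
      = (tweet.filterMap (pvFirstIdx words)).foldl (fun d x => d.modify x 0 (· + 1)) d := by
  intro tweet
  induction tweet with
  | nil => intro d; rfl
  | cons w tw ih =>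
    intro d
    rw [List.foldl_cons]
    rcases hj : PySem.List.index? words w with _ | j
    · have hf : pvFirstIdx words w = none := by unfold pvFirstIdx; rw [hj]; rfl
      simp only [List.filterMap_cons, hf]
      exact ih d
    · have hf : pvFirstIdx words w = some (j : Int) := by unfold pvFirstIdx; rw [hj]; rfl
      have hstep : (if d.contains (j : Int) = false then d.insert (j : Int) 1
          else d.modify (j : Int) 0 (· + 1)) = d.modify (j : Int) 0 (· + 1) := by
        by_cases hc : d.contains (j : Int) = true
        · rw [if_neg (by simp [hc])]
        · rw [if_pos (by simpa using hc)]
          unfold PySem.Dict.modify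
          rw [PySem.Dict.getD_of_not_contains d 0 (by simpa using hc)]
          norm_num
      simp only [List.filterMap_cons, hf, List.foldl_cons, hstep]
      exact ih (d.modify (j : Int) 0 (· + 1))

-- A's result is the Counter of the tweet's first-occurrence indices
theorem pvA_eq_counter (words : List String) (tweet : List String) :
    create_wordvec words tweet
      = (PySem.Dict.counter (tweet.filterMap (pvFirstIdx words))).items := by
  simp only [create_wordvec]
  rw [PySem.Dict.counter_eq_foldl]
  exact congrArg PySem.Dict.items (pvA_loop words tweet PySem.Dict.empty)

-- `words.index(w)` as a total key function (meaningful when w ∈ words)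
def pvKey (words : List String) (w : String) : Int :=
  (((PySem.List.index? words w).getD 0 : Nat) : Int)

theorem pvFirstIdx_of_contains {words : List String} {w : String}
    (h : words.contains w = true) : pvFirstIdx words w = some (pvKey words w) := by
  have hm : w ∈ words := by simpa using h
  rcases hj : PySem.List.index? words w with _ | j
  · rw [PySem.List.index?_eq_none_iff] at hj; exact absurd hm hj
  · simp only [pvFirstIdx, pvKey, hj, Option.map_some, Option.getD_some]

theorem pvFirstIdx_of_not_contains {words : List String} {w : String}
    (h : words.contains w = false) : pvFirstIdx words w = none := by
  have hm : w ∉ words := by simpa using h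
  have hj : PySem.List.index? words w = none := by
    rw [PySem.List.index?_eq_none_iff]; exact hm
  simp only [pvFirstIdx, hj, Option.map_none]

-- filterMap by the first index is: filter to the vocabulary, then map the key
theorem pvFilterMap_filter (words : List String) :
    ∀ l : List String,
    l.filterMap (pvFirstIdx words)
      = (l.filter (fun w => words.contains w)).map (pvKey words) := by
  intro l
  induction l with
  | nil => rfl
  | cons x xs ih =>
    by_cases hc : words.contains x = true
    · rw [List.filterMap_cons, pvFirstIdx_of_contains hc,
        List.filter_cons_of_pos hc, List.map_cons, ih]
    · have hc' : words.contains x = false := by simpa using hc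
      rw [List.filterMap_cons, pvFirstIdx_of_not_contains hc',
        List.filter_cons_of_neg (by simp only [hc']; exact Bool.false_ne_true)]
      exact ih

-- ===== VERDICT (by name: the statement is the Claim_ definition above) =====
theorem create_wordvec_spec : Claim_equal_create_wordvec := by
  intro words tweet _
  unfold Spec_create_wordvec
  rw [pvA_eq_counter, PySem.Dict.items_counter]
  simp only [create_wordvec_alt, PySem.List.dedup_eq_ofList]
  -- B side: drop the guard, then the loop is a fresh-key insert loop
  rw [PySem.List.foldl_if_eq_foldl_filter]
  have hcong :
      List.foldl (fun (out : PySem.Dict Int Int) w =>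
          match PySem.List.index? words w with
          | some j => out.insert (j : Int) ((PySem.List.count tweet w : Nat) : Int)
          | none => out)
        PySem.Dict.empty
        (List.filter (fun w => words.contains w) (PySem.Set.ofList tweet))
      = List.foldl (fun (out : PySem.Dict Int Int) w =>
          out.insert (pvKey words w) ((PySem.List.count tweet w : Nat) : Int))
        PySem.Dict.empty
        (List.filter (fun w => words.contains w) (PySem.Set.ofList tweet)) := by
    apply PySem.List.foldl_congr_mem
    intro out w hw
    have hc : words.contains w = true := (List.mem_filter.mp hw).2
    have hm : w ∈ words := by simpa using hc
    rcases hj : PySem.List.index? words w with _ | j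
    · rw [PySem.List.index?_eq_none_iff] at hj
      exact absurd hm hj
    · have hk : pvKey words w = (j : Int) := by
        simp only [pvKey, hj, Option.getD_some]
      simp only [hk]
  rw [hcong]
  have hnodup : (List.map (pvKey words)
      (List.filter (fun w => words.contains w) (PySem.Set.ofList tweet))).Nodup := by
    apply (List.Nodup.filter _ (PySem.Set.nodup_ofList tweet)).map_on
    intro x hx y hy hxy
    exact pvFirstIdx_inj
      (pvFirstIdx_of_contains (List.mem_filter.mp hx).2)
      (hxy ▸ pvFirstIdx_of_contains (List.mem_filter.mp hy).2)
  rw [PySem.Dict.items_foldl_insert_fresh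
      (List.filter (fun w => words.contains w) (PySem.Set.ofList tweet))
      (pvKey words) (fun w => ((PySem.List.count tweet w : Nat) : Int))
      PySem.Dict.empty
      (fun a _ => PySem.Dict.contains_empty _) hnodup]
  -- A side: the set of first indices is the mapped filtered set of tweet words
  have hset : PySem.Set.ofList (tweet.filterMap (pvFirstIdx words))
      = ((PySem.Set.ofList tweet).filter (fun w => words.contains w)).map (pvKey words) := by
    have h1 : PySem.Set.ofList (tweet.filterMap (pvFirstIdx words))
        = (PySem.Set.ofList tweet).filterMap (pvFirstIdx words) := by
      have := pvOfList_filterMap (pvFirstIdx words)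
        (fun a b c ha hb => pvFirstIdx_inj ha hb) tweet []
      simpa [PySem.Set.ofList_eq_foldl] using this
    rw [h1, pvFilterMap_filter]
  have hie : (PySem.Dict.empty (κ := Int) (ν := Int)).items = [] := rfl
  rw [hset, List.map_map, hie]
  simp only [List.nil_append]
  apply List.map_congr_left
  intro w hw
  have hc : words.contains w = true := (List.mem_filter.mp hw).2
  -- counts agree: occurrences of key (pvKey w) among the first indices = tweet.count w
  have hcount : (tweet.filterMap (pvFirstIdx words)).count (pvKey words w)
      = tweet.count w := by
    rw [List.count_filterMap, List.count]
    apply List.countP_congr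
    intro a _
    constructor
    · intro h
      have ha : pvFirstIdx words a = some (pvKey words w) := by simpa using h
      exact beq_iff_eq.mpr (pvFirstIdx_inj ha (pvFirstIdx_of_contains hc))
    · intro h
      have : a = w := beq_iff_eq.mp h
      subst this
      simp [pvFirstIdx_of_contains hc]
  simp [Function.comp, hcount, PySem.List.count_eq]
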